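-- pv_equiv track=rewrite | github.com/TheAhmedYousry/activityRecognition | HofAllClasses.py | get_indicies
-- ===== SOURCE A (Python) =====
-- def get_indicies(number):
--     min = 0
--     max = 0
--
--     if number > 360:
--       number = number - 360
--
--     if number > 180 and number < 360:
--       number = number-180
--
--     if number > 160 and number < 180:
--       min = 160
--       max = 0
--       return min, max
--
--     # check max
--     for i in range(0,160,20):
--       if number >  i:
--         min = i
--         max = i + 20
--
--     return min, max
-- ===== SOURCE B (Python) =====
-- def get_indicies(number):
--     if number > 360:
--         number = number - 360
--     if number > 180 and number < 360:
--         number = number - 180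
--     if number > 160 and number < 180:
--         return 160, 0
--     if number <= 0:
--         return 0, 0
--     lo = (number - 1) // 20 * 20
--     if lo > 140:
--         lo = 140
--     return lo, lo + 20
-- ===== Notes on version B (the rewrite author's own statement) =====
-- stated objective: simpler
-- what changed: The final bucket-search loop over range(0,160,20) is replaced by a closed-form floor-division ((number-1)//20*20) with a non-positive check and a 140 clamp; the three normalization guards are kept.
import Mathlib
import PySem

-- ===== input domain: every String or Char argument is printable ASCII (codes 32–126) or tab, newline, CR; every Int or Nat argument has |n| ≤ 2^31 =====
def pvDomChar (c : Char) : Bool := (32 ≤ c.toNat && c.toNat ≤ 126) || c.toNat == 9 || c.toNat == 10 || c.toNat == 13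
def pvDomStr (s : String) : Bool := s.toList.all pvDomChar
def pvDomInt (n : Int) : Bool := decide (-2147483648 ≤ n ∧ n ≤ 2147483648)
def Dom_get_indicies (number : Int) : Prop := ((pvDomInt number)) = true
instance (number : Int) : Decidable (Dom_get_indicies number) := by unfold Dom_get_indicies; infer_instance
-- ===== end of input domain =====

-- B replaces A's 8-iteration bucket-search loop by a closed-form floor-division with a clamp (objective: simpler).

-- ===== PORT A =====
def get_indicies (number : Int) : Int × Int :=
  let min : Int := 0
  let max : Int := 0
  let number := if number > 360 then number - 360 else number
  let number := if number > 180 ∧ number < 360 then number - 180 else number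
  if number > 160 ∧ number < 180 then
    (160, 0)
  else
    (PySem.List.pyRange 0 160 20).foldl
      (fun (st : Int × Int) (i : Int) => if number > i then (i, i + 20) else st)
      (min, max)

-- ===== PORT B =====
def get_indicies_alt (number : Int) : Int × Int :=
  let number := if number > 360 then number - 360 else number
  let number := if number > 180 ∧ number < 360 then number - 180 else number
  if number > 160 ∧ number < 180 then
    (160, 0)
  else if number ≤ 0 then
    (0, 0)
  else
    let lo := PySem.Int.floordiv (number - 1) 20 * 20
    let lo := if lo > 140 then 140 else lo
    (lo, lo + 20)

-- ===== PRECONDITION & SPEC =====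
def Spec_get_indicies (number : Int) (out : Int × Int) : Prop := out = get_indicies_alt number
instance (number : Int) (out : Int × Int) : Decidable (Spec_get_indicies number out) := by unfold Spec_get_indicies; infer_instance

-- ===== CLAIM (what is proved, stated in full; the proofs are below) =====
def Claim_equal_get_indicies : Prop := ∀ (number : Int), Dom_get_indicies number → Spec_get_indicies number (get_indicies number)

-- ===== LEMMAS AND PROOFS =====
theorem pvRange_lit : PySem.List.pyRange 0 160 20 = [0, 20, 40, 60, 80, 100, 120, 140] := by decide

-- the loop equals the closed form, for every normalized value n
theorem pv_core (n : Int) :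
    ([(0:Int), 20, 40, 60, 80, 100, 120, 140].foldl
      (fun (st : Int × Int) (i : Int) => if n > i then (i, i + 20) else st) ((0:Int), (0:Int)))
    = (if n ≤ 0 then ((0:Int), (0:Int)) else
        let lo := PySem.Int.floordiv (n - 1) 20 * 20
        let lo := if lo > 140 then 140 else lo
        (lo, lo + 20)) := by
  have h : PySem.Int.floordiv (n - 1) 20 = (n - 1) / 20 :=
    PySem.Int.floordiv_eq_ediv_of_pos (by omega)
  simp only [List.foldl, h]
  split_ifs <;> simp_all <;> omega

theorem pv_tail (n : Int) :
    (if n > 160 ∧ n < 180 then ((160:Int), (0:Int)) else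
      ([(0:Int), 20, 40, 60, 80, 100, 120, 140].foldl
        (fun (st : Int × Int) (i : Int) => if n > i then (i, i + 20) else st) ((0:Int), (0:Int))))
    = (if n > 160 ∧ n < 180 then ((160:Int), (0:Int)) else if n ≤ 0 then (0, 0) else
        let lo := PySem.Int.floordiv (n - 1) 20 * 20
        let lo := if lo > 140 then 140 else lo
        (lo, lo + 20)) := by
  by_cases h : n > 160 ∧ n < 180
  · simp [h]
  · simp only [h, if_false]
    exact pv_core n

theorem get_indicies_spec : Claim_equal_get_indicies := by
  intro number _
  unfold Spec_get_indicies get_indicies get_indicies_alt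
  dsimp only
  simp only [pvRange_lit]
  exact pv_tail _
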